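-- pv_equiv track=rewrite | github.com/joecode0/Project-Euler-Solutions | src/solutions_61-70.py | get_square_numbers
-- ===== SOURCE A (Python) =====
-- def convert_to_dict(numbers, num_digits):
--     output_dict = {}
--     for number in numbers:
--         str_num = str(number)
--         if len(str_num) == num_digits:
--             output_dict[str_num[:2]] = []
--     for number in numbers:
--         str_num = str(number)
--         if len(str_num) == num_digits:
--             output_dict[str(str_num[:2])].append(str(str_num[2:]))
--     return output_dict
--
-- def get_square_numbers(num_digits):
--     square_numbers = []
--     n = 1
--     val = 1
--     while val < 10**num_digits:
--         val = int(n**2)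
--         square_numbers.append(val)
--         n += 1
--     return convert_to_dict(square_numbers, num_digits)
-- ===== SOURCE B (Python) =====
-- def get_square_numbers(num_digits):
--     result = {}
--     n = 1
--     while True:
--         s = str(n * n)
--         if len(s) > num_digits:
--             break
--         if len(s) == num_digits:
--             result[s[:2]] = result.get(s[:2], []) + [s[2:]]
--         n += 1
--     return result
-- ===== Notes on version B (the rewrite author's own statement) =====
-- stated objective: simpler
-- what changed: Replaces build-full-list-of-squares plus two-pass convert_to_dict (key-creation pass, then append pass) by a single grouping pass that walks n upward, stops at the first square longer than num_digits, and groups d-digit squares directly with result.get(key, []) + [rest].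
import Mathlib
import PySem

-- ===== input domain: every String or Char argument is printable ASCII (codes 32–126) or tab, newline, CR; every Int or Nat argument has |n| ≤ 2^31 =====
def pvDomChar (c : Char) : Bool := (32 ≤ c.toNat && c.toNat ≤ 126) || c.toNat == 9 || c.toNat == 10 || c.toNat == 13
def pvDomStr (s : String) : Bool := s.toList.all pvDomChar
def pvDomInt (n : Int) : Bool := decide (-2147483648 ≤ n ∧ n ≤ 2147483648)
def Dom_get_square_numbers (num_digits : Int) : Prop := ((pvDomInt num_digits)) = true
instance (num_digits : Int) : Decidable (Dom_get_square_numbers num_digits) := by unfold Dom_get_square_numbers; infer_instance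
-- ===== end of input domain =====

-- B replaces A's build-a-list-of-squares plus two-pass convert_to_dict by a single grouping
-- pass that stops at the first square with more than num_digits digits (objective: simpler).

-- ===== PORT A =====

/-- A's loop test `val < 10**num_digits`.  For `num_digits < 0` Python's `10**num_digits`
is a float strictly between 0 and 1, and `val` is ≥ 1 at every test of A's loop, so the
comparison is exactly `False` there; for `num_digits ≥ 0` it is integer comparison.
Exact on A's uses. -/
def pvCondLt (val : Int) (num_digits : Int) : Bool :=
  if num_digits < 0 then false else decide (val < 10 ^ num_digits.toNat)

/-- A's `while` loop: `while val < 10**num_digits: val = int(n**2); square_numbers.append(val); n += 1`.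
The fuel only makes the recursion structural; it is large enough to never be exhausted. -/
def pvALoop (num_digits : Int) : Nat → Int → Int → List Int → List Int
  | 0, _, _, square_numbers => square_numbers
  | fuel + 1, n, val, square_numbers =>
    if pvCondLt val num_digits then
      pvALoop num_digits fuel (n + 1) (n ^ 2) (square_numbers ++ [n ^ 2])
    else square_numbers

/-- first loop of `convert_to_dict`: `output_dict[str_num[:2]] = []`. -/
def pvPass1Step (num_digits : Int) (od : PySem.Dict String (List String)) (number : Int) :
    PySem.Dict String (List String) :=
  let str_num := PySem.Int.toStr number
  if PySem.Str.len str_num = num_digits then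
    od.insert (PySem.Str.slice str_num none (some 2)) []
  else od

/-- second loop of `convert_to_dict`: `output_dict[str(str_num[:2])].append(str(str_num[2:]))`.
The key was created under the same condition by the first loop, so the entry exists and
`Dict.modify` (d[k] = f(d.get(k, dflt))) is exact here. `str(...)` of a str is the str itself. -/
def pvPass2Step (num_digits : Int) (od : PySem.Dict String (List String)) (number : Int) :
    PySem.Dict String (List String) :=
  let str_num := PySem.Int.toStr number
  if PySem.Str.len str_num = num_digits then
    od.modify (PySem.Str.slice str_num none (some 2)) []
      (fun v => v ++ [PySem.Str.slice str_num (some 2) none])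
  else od

def pvConvertToDict (numbers : List Int) (num_digits : Int) : PySem.Dict String (List String) :=
  numbers.foldl (pvPass2Step num_digits) (numbers.foldl (pvPass1Step num_digits) PySem.Dict.empty)

def get_square_numbers (num_digits : Int) : List (String × List String) :=
  (pvConvertToDict
    (pvALoop num_digits (10 ^ (num_digits.toNat / 2 + 1)) 1 1 []) num_digits).items

-- ===== PORT B =====

/-- Source B's `while True` loop; the fuel only makes the recursion structural (the loop breaks
long before it runs out).  `result[s[:2]] = result.get(s[:2], []) + [s[2:]]` is exactly
`Dict.modify` (d[k] = f(d.get(k, dflt)); new keys are appended, existing keys keep position). -/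
def pvBLoop (num_digits : Int) : Nat → Int → PySem.Dict String (List String) → PySem.Dict String (List String)
  | 0, _, result => result
  | fuel + 1, n, result =>
    let s := PySem.Int.toStr (n * n)
    if num_digits < PySem.Str.len s then result
    else
      pvBLoop num_digits fuel (n + 1)
        (if PySem.Str.len s = num_digits then
          result.modify (PySem.Str.slice s none (some 2)) []
            (fun v => v ++ [PySem.Str.slice s (some 2) none])
        else result)

def get_square_numbers_alt (num_digits : Int) : List (String × List String) :=
  (pvBLoop num_digits (10 ^ (num_digits.toNat / 2 + 1)) 1 PySem.Dict.empty).items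

-- ===== PRECONDITION & SPEC =====
def Spec_get_square_numbers (num_digits : Int) (out : List (String × List String)) : Prop := out = get_square_numbers_alt num_digits
instance (num_digits : Int) (out : List (String × List String)) : Decidable (Spec_get_square_numbers num_digits out) := by unfold Spec_get_square_numbers; infer_instance

-- ===== CLAIM (what is proved, stated in full; the proofs are below) =====
def Claim_equal_get_square_numbers : Prop := ∀ (num_digits : Int), Dom_get_square_numbers num_digits → Spec_get_square_numbers num_digits (get_square_numbers num_digits)

-- ===== LEMMAS AND PROOFS =====

/-- the square of n = j+1, as a Nat. -/
def pvSq (j : Nat) : Nat := (j + 1) * (j + 1)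

lemma pvSq_pos (j : Nat) : 1 ≤ pvSq j := by unfold pvSq; nlinarith

lemma pvSq_mono {j k : Nat} (h : j ≤ k) : pvSq j ≤ pvSq k := by
  unfold pvSq; exact Nat.mul_le_mul (by omega) (by omega)

lemma pvSq_exists (D : Nat) : ∃ j, 10 ^ D ≤ pvSq j := ⟨10 ^ D, by unfold pvSq; nlinarith⟩

/-- least j with 10^D ≤ (j+1)²; A's loop appends the squares of 1 .. pvM D + 1 and B's loop
processes the squares of 1 .. pvM D. -/
def pvM (D : Nat) : Nat := Nat.find (pvSq_exists D)

lemma pvM_le (D j : Nat) (h : pvM D ≤ j) : 10 ^ D ≤ pvSq j :=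
  le_trans (Nat.find_spec (pvSq_exists D)) (pvSq_mono h)

lemma pvM_gt (D j : Nat) (h : j < pvM D) : pvSq j < 10 ^ D :=
  Nat.lt_of_not_le (Nat.find_min (pvSq_exists D) h)

lemma pvM_fuel (D : Nat) : pvM D + 1 ≤ 10 ^ (D / 2 + 1) := by
  have h1 : (1 : Nat) ≤ 10 ^ (D / 2 + 1) := Nat.one_le_pow _ _ (by omega)
  have h2 : 10 ^ D ≤ pvSq (10 ^ (D / 2 + 1) - 1) := by
    unfold pvSq
    rw [Nat.sub_add_cancel h1, ← pow_add]
    exact Nat.pow_le_pow_right (by omega) (by omega)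
  have h3 : pvM D ≤ 10 ^ (D / 2 + 1) - 1 := Nat.find_le h2
  omega

-- number of decimal digits
lemma pvToDigitsCore_len : ∀ (f n : Nat), n < f →
    (Nat.toDigitsCore 10 f n []).length = Nat.log 10 n + 1 := by
  intro f
  induction f with
  | zero => intro n hn; omega
  | succ f ih =>
    intro n hn
    by_cases h10 : n / 10 = 0
    · have hlt : n < 10 := by omega
      simp [Nat.toDigitsCore, h10, Nat.log_eq_zero_iff.mpr (Or.inl hlt)]
    · have hge : 10 ≤ n := by
        by_contra hc
        exact h10 (Nat.div_eq_of_lt (by omega))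
      have hrec : (Nat.toDigitsCore 10 (f + 1) n []) =
          Nat.toDigitsCore 10 f (n / 10) [Nat.digitChar (n % 10)] := by
        simp [Nat.toDigitsCore, h10]
      rw [hrec, Nat.toDigitsCore_lens_eq, ih (n / 10) (by omega)]
      have hlog := Nat.log_div_base 10 n
      have hpos := Nat.log_pos (b := 10) (by omega) hge
      omega

lemma pvToDigits_len (n : Nat) : (Nat.toDigits 10 n).length = Nat.log 10 n + 1 :=
  pvToDigitsCore_len (n + 1) n (Nat.lt_succ_self n)

lemma pvStrLen (v : Nat) :
    PySem.Str.len (PySem.Int.toStr ((v : Nat) : Int)) = ((Nat.toDigits 10 v).length : Int) := by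
  rw [PySem.Str.len_eq, PySem.Int.toList_toStr]
  have h : ¬ (((v : Nat) : Int) < 0) := by omega
  simp [PySem.Int.toChars, h]

lemma pvLen_le (D v : Nat) (hv : 1 ≤ v) (h : v < 10 ^ D) : (Nat.toDigits 10 v).length ≤ D := by
  rw [pvToDigits_len]
  have := (Nat.log_lt_iff_lt_pow (b := 10) (by omega) (by omega)).mpr h
  omega

lemma pvLen_ge (D v : Nat) (h : 10 ^ D ≤ v) : D + 1 ≤ (Nat.toDigits 10 v).length := by
  have hv : v ≠ 0 := by
    have : (0 : Nat) < 10 ^ D := pow_pos (by omega) D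
    omega
  rw [pvToDigits_len]
  have := (Nat.le_log_iff_pow_le (b := 10) (by omega) hv).mpr h
  omega

lemma pvNoBreak (d : Int) (hd : 1 ≤ d) (j : Nat) (hj : j < pvM d.toNat) :
    ¬ (d < PySem.Str.len (PySem.Int.toStr ((pvSq j : Nat) : Int))) := by
  rw [pvStrLen]
  have h1 := pvLen_le d.toNat (pvSq j) (pvSq_pos j) (pvM_gt d.toNat j hj)
  have h2 : ((d.toNat : Nat) : Int) = d := Int.toNat_of_nonneg (by omega)
  omega

lemma pvBreak (d : Int) (hd : 1 ≤ d) (j : Nat) (hj : pvM d.toNat ≤ j) :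
    d < PySem.Str.len (PySem.Int.toStr ((pvSq j : Nat) : Int)) := by
  rw [pvStrLen]
  have h1 := pvLen_ge d.toNat (pvSq j) (pvM_le d.toNat j hj)
  have h2 : ((d.toNat : Nat) : Int) = d := Int.toNat_of_nonneg (by omega)
  omega

lemma pvCondLt_nat (d : Int) (hd : 0 ≤ d) (x : Nat) :
    pvCondLt ((x : Nat) : Int) d = decide (x < 10 ^ d.toNat) := by
  unfold pvCondLt
  rw [if_neg (by omega)]
  have h : (((10 : Nat) ^ d.toNat : Nat) : Int) = (10 : Int) ^ d.toNat := by push_cast; ring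
  rw [decide_eq_decide]
  rw [← h]
  exact_mod_cast Iff.rfl

-- ----- A's loop -----

lemma pvALoop_run (d : Int) (hd : 1 ≤ d) (fuel : Nat) :
    ∀ (j : Nat) (val : Int) (acc : List Int),
      pvM d.toNat + 1 ≤ fuel + j →
      pvCondLt val d = decide (j ≤ pvM d.toNat) →
      pvALoop d fuel ((j : Int) + 1) val acc
        = acc ++ (List.range (pvM d.toNat + 1 - j)).map (fun i => ((pvSq (j + i) : Nat) : Int)) := by
  induction fuel with
  | zero =>
    intro j val acc hf hc
    have h0 : pvM d.toNat + 1 - j = 0 := by omega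
    simp [pvALoop, h0]
  | succ fuel ih =>
    intro j val acc hf hc
    by_cases hj : j ≤ pvM d.toNat
    · have hcj : pvCondLt val d = true := by rw [hc]; simpa using hj
      rw [show pvALoop d (fuel + 1) ((j : Int) + 1) val acc =
          pvALoop d fuel (((j : Int) + 1) + 1) (((j : Int) + 1) ^ 2)
            (acc ++ [((j : Int) + 1) ^ 2]) from by simp [pvALoop, hcj]]
      have hsq : ((j : Int) + 1) ^ 2 = ((pvSq j : Nat) : Int) := by unfold pvSq; push_cast; ring
      have hn : ((j : Int) + 1) + 1 = ((j + 1 : Nat) : Int) + 1 := by push_cast; ring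
      have hcnext : pvCondLt ((pvSq j : Nat) : Int) d = decide (j + 1 ≤ pvM d.toNat) := by
        rw [pvCondLt_nat d (by omega), decide_eq_decide]
        constructor
        · intro h
          by_contra hcontra
          exact absurd (pvM_le d.toNat j (by omega)) (by omega)
        · intro h
          exact pvM_gt d.toNat j (by omega)
      rw [hsq, hn, ih (j + 1) _ _ (by omega) hcnext]
      have hk : pvM d.toNat + 1 - j = (pvM d.toNat + 1 - (j + 1)) + 1 := by omega
      rw [hk, List.range_succ_eq_map, List.map_cons, List.map_map, List.append_assoc]
      congr 1
      rw [show ((pvSq (j + 0) : Nat) : Int) = ((pvSq j : Nat) : Int) from by rw [Nat.add_zero]]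
      rw [List.singleton_append]
      congr 1
      apply List.map_congr_left
      intro i _
      simp only [Function.comp]
      congr 2
      omega
    · have hcj : pvCondLt val d = false := by rw [hc]; simpa using hj
      have h0 : pvM d.toNat + 1 - j = 0 := by omega
      simp [pvALoop, hcj, h0]

-- ----- B's loop -----

/-- one iteration of Source B's loop on n = j+1 (no break). -/
def pvStep (num_digits : Int) (result : PySem.Dict String (List String)) (j : Nat) :
    PySem.Dict String (List String) :=
  let s := PySem.Int.toStr ((pvSq j : Nat) : Int)
  if PySem.Str.len s = num_digits then
    result.modify (PySem.Str.slice s none (some 2)) []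
      (fun v => v ++ [PySem.Str.slice s (some 2) none])
  else result

lemma pvBLoop_run (d : Int) (hd : 1 ≤ d) (fuel : Nat) :
    ∀ (j : Nat) (dict : PySem.Dict String (List String)),
      pvM d.toNat ≤ fuel + j →
      pvBLoop d fuel ((j : Int) + 1) dict
        = (List.range (pvM d.toNat - j)).foldl (fun dd i => pvStep d dd (j + i)) dict := by
  induction fuel with
  | zero =>
    intro j dict hf
    have h0 : pvM d.toNat - j = 0 := by omega
    simp [pvBLoop, h0]
  | succ fuel ih =>
    intro j dict hf
    have hsq : ((j : Int) + 1) * ((j : Int) + 1) = ((pvSq j : Nat) : Int) := by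
      unfold pvSq; push_cast; ring
    by_cases hj : pvM d.toNat ≤ j
    · have hbr := pvBreak d hd j hj
      have h0 : pvM d.toNat - j = 0 := by omega
      rw [show pvBLoop d (fuel + 1) ((j : Int) + 1) dict = dict from by
        simp only [pvBLoop]
        rw [hsq, if_pos hbr]]
      simp [h0]
    · have hnb := pvNoBreak d hd j (by omega)
      have hn : ((j : Int) + 1) + 1 = ((j + 1 : Nat) : Int) + 1 := by push_cast; ring
      rw [show pvBLoop d (fuel + 1) ((j : Int) + 1) dict =
          pvBLoop d fuel (((j + 1 : Nat) : Int) + 1) (pvStep d dict j) from by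
        simp only [pvBLoop]
        rw [hsq, if_neg hnb, hn]
        rfl]
      rw [ih (j + 1) _ (by omega)]
      have hk : pvM d.toNat - j = (pvM d.toNat - (j + 1)) + 1 := by omega
      rw [hk, List.range_succ_eq_map, List.foldl_cons, List.foldl_map]
      rw [show pvStep d dict (j + 0) = pvStep d dict j from by rw [Nat.add_zero]]
      apply PySem.List.foldl_congr_mem
      intro acc x _
      congr 1
      omega

-- ----- abstract forms of the per-element steps -----

abbrev pvC (d : Int) (j : Nat) : Prop :=
  PySem.Str.len (PySem.Int.toStr ((pvSq j : Nat) : Int)) = d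

def pvKey (j : Nat) : String :=
  PySem.Str.slice (PySem.Int.toStr ((pvSq j : Nat) : Int)) none (some 2)

def pvRest (j : Nat) : String :=
  PySem.Str.slice (PySem.Int.toStr ((pvSq j : Nat) : Int)) (some 2) none

lemma pvPass1Step_eq (d : Int) (od : PySem.Dict String (List String)) (j : Nat) :
    pvPass1Step d od ((pvSq j : Nat) : Int)
      = if pvC d j then od.insert (pvKey j) [] else od := rfl

lemma pvPass2Step_eq (d : Int) (od : PySem.Dict String (List String)) (j : Nat) :
    pvPass2Step d od ((pvSq j : Nat) : Int)
      = if pvC d j then od.modify (pvKey j) [] (fun v => v ++ [pvRest j]) else od := rfl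

lemma pvStep_eq (d : Int) (od : PySem.Dict String (List String)) (j : Nat) :
    pvStep d od j
      = if pvC d j then od.modify (pvKey j) [] (fun v => v ++ [pvRest j]) else od := rfl

/-- the (first-two-chars, rest) pairs of the elements of l passing the digit-count test. -/
def pvPairsOf (d : Int) (l : List Nat) : List (String × String) :=
  (l.filter (fun j => decide (pvC d j))).map (fun j => (pvKey j, pvRest j))

lemma pvPairsOf_cons (d : Int) (j : Nat) (t : List Nat) :
    pvPairsOf d (j :: t)
      = if pvC d j then (pvKey j, pvRest j) :: pvPairsOf d t else pvPairsOf d t := by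
  unfold pvPairsOf
  rw [List.filter_cons]
  by_cases h : pvC d j
  · rw [if_pos (by simpa using h), if_pos h, List.map_cons]
  · rw [if_neg (by simpa using h), if_neg h]

lemma pvInsAbs (d : Int) : ∀ (l : List Nat) (init : PySem.Dict String (List String)),
    l.foldl (fun od j => if pvC d j then od.insert (pvKey j) [] else od) init
      = (pvPairsOf d l).foldl (fun od p => od.insert p.1 []) init := by
  intro l
  induction l with
  | nil => intro init; rfl
  | cons j t ih =>
    intro init
    rw [List.foldl_cons, pvPairsOf_cons]
    by_cases h : pvC d j
    · rw [if_pos h, if_pos h, List.foldl_cons, ih]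
    · rw [if_neg h, if_neg h, ih]

lemma pvModAbs (d : Int) : ∀ (l : List Nat) (init : PySem.Dict String (List String)),
    l.foldl (fun od j => if pvC d j then od.modify (pvKey j) [] (fun v => v ++ [pvRest j]) else od) init
      = (pvPairsOf d l).foldl (fun od p => od.modify p.1 [] (fun v => v ++ [p.2])) init := by
  intro l
  induction l with
  | nil => intro init; rfl
  | cons j t ih =>
    intro init
    rw [List.foldl_cons, pvPairsOf_cons]
    by_cases h : pvC d j
    · rw [if_pos h, if_pos h, List.foldl_cons, ih]
    · rw [if_neg h, if_neg h, ih]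

-- ----- two passes into one pass, on any pair list -----

lemma pvInsFold_getD {κ : Type} [BEq κ] [LawfulBEq κ] [DecidableEq κ] {β : Type} :
    ∀ (ps : List (κ × β)) (dd : PySem.Dict κ (List β)), (∀ c, dd.getD c [] = []) →
      ∀ c, (ps.foldl (fun dd p => dd.insert p.1 []) dd).getD c [] = [] := by
  intro ps
  induction ps with
  | nil => intro dd h c; simpa using h c
  | cons p t ih =>
    intro dd h c
    rw [List.foldl_cons]
    apply ih
    intro c'
    rw [PySem.Dict.getD_insert]
    split_ifs with h'
    · rfl
    · exact h c'

lemma pvSetUpdate_self {α : Type} [BEq α] [LawfulBEq α] (s : PySem.Set α) (l : List α)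
    (h : ∀ x ∈ l, x ∈ s) : PySem.Set.update s l = s := by
  rw [PySem.Set.update_eq_append_filter]
  have hf : List.filter (fun y => !s.contains y) (PySem.Set.ofList l) = [] := by
    apply List.filter_eq_nil_iff.mpr
    intro y hy
    have hys : y ∈ s := h y ((PySem.Set.mem_ofList l y).mp hy)
    simpa using hys
  rw [hf, List.append_nil]

lemma pvTwoPass {κ : Type} [BEq κ] [LawfulBEq κ] [DecidableEq κ] {β : Type} (ps : List (κ × β)) :
    ps.foldl (fun dd p => dd.modify p.1 [] (fun v => v ++ [p.2]))
        (ps.foldl (fun dd p => dd.insert p.1 []) PySem.Dict.empty)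
      = ps.foldl (fun dd p => dd.modify p.1 [] (fun v => v ++ [p.2])) PySem.Dict.empty := by
  apply PySem.Dict.ext
  set d0 : PySem.Dict κ (List β) := ps.foldl (fun dd p => dd.insert p.1 []) PySem.Dict.empty with hd0
  have hnd0 : d0.keys.Nodup :=
    PySem.Dict.nodup_keys_foldl_insert_key ps Prod.fst (fun _ _ => []) PySem.Dict.empty
      PySem.Dict.nodup_keys_empty
  have hndL : (ps.foldl (fun dd p => dd.modify p.1 [] (fun v => v ++ [p.2])) d0).keys.Nodup :=
    PySem.Dict.nodup_keys_foldl_modify_key ps Prod.fst [] (fun _ p => fun v => v ++ [p.2]) d0 hnd0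
  have hndR : (ps.foldl (fun dd p => dd.modify p.1 [] (fun v => v ++ [p.2])) PySem.Dict.empty).keys.Nodup :=
    PySem.Dict.nodup_keys_foldl_modify_key ps Prod.fst [] (fun _ p => fun v => v ++ [p.2])
      PySem.Dict.empty PySem.Dict.nodup_keys_empty
  have hk0 : d0.keys = PySem.Set.ofList (ps.map Prod.fst) := by
    have h := PySem.Dict.keys_foldl_insert_key ps Prod.fst (fun _ _ => ([] : List β)) PySem.Dict.empty
    rw [hd0]
    rw [show (ps.foldl (fun dd p => dd.insert p.1 []) PySem.Dict.empty)
        = (List.foldl (fun d x => d.insert (Prod.fst x) ((fun _ _ => ([] : List β)) d x)) PySem.Dict.empty ps) from rfl]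
    rw [h, PySem.Dict.keys_empty, PySem.Set.update_nil_left]
  have hkL : (ps.foldl (fun dd p => dd.modify p.1 [] (fun v => v ++ [p.2])) d0).keys
      = PySem.Set.ofList (ps.map Prod.fst) := by
    have h := PySem.Dict.keys_foldl_modify_key ps Prod.fst ([] : List β)
      (fun _ p => fun v => v ++ [p.2]) d0
    rw [show (ps.foldl (fun dd p => dd.modify p.1 [] (fun v => v ++ [p.2])) d0)
        = (List.foldl (fun d x => d.modify (Prod.fst x) ([] : List β) ((fun _ p => fun v => v ++ [p.2]) d x)) d0 ps) from rfl]
    rw [h, hk0]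
    exact pvSetUpdate_self _ _ (fun x hx => (PySem.Set.mem_ofList _ x).mpr hx)
  have hkR : (ps.foldl (fun dd p => dd.modify p.1 [] (fun v => v ++ [p.2])) PySem.Dict.empty).keys
      = PySem.Set.ofList (ps.map Prod.fst) := by
    have h := PySem.Dict.keys_foldl_modify_key ps Prod.fst ([] : List β)
      (fun _ p => fun v => v ++ [p.2]) PySem.Dict.empty
    rw [show (ps.foldl (fun dd p => dd.modify p.1 [] (fun v => v ++ [p.2])) PySem.Dict.empty)
        = (List.foldl (fun d x => d.modify (Prod.fst x) ([] : List β) ((fun _ p => fun v => v ++ [p.2]) d x)) PySem.Dict.empty ps) from rfl]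
    rw [h, PySem.Dict.keys_empty, PySem.Set.update_nil_left]
  rw [PySem.Dict.items_eq_map_keys _ hndL ([] : List β),
      PySem.Dict.items_eq_map_keys _ hndR ([] : List β), hkL, hkR]
  apply List.map_congr_left
  intro k _
  have hL := PySem.Dict.getD_foldl_modify_append ps d0 k
  have hR := PySem.Dict.getD_foldl_modify_append ps PySem.Dict.empty k
  have h0 : d0.getD k [] = [] :=
    pvInsFold_getD ps PySem.Dict.empty (fun c => PySem.Dict.getD_empty c []) k
  rw [hL, hR, h0, PySem.Dict.getD_empty]

-- ----- main equality for num_digits ≥ 1 -----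

lemma pvMain (d : Int) (hd : 1 ≤ d) : get_square_numbers d = get_square_numbers_alt d := by
  unfold get_square_numbers get_square_numbers_alt
  have hfuel := pvM_fuel d.toNat
  -- A's loop
  have h10 : (10 : Nat) ≤ 10 ^ d.toNat := by
    calc (10 : Nat) = 10 ^ 1 := (pow_one 10).symm
    _ ≤ 10 ^ d.toNat := Nat.pow_le_pow_right (by omega) (by omega)
  have hc1 : pvCondLt 1 d = true := by
    have h := pvCondLt_nat d (by omega) 1
    simp only [Nat.cast_one] at h
    rw [h, decide_eq_true_eq]
    omega
  have hc0 : pvCondLt 1 d = decide ((0 : Nat) ≤ pvM d.toNat) := by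
    rw [hc1]; simp
  have hA := pvALoop_run d hd (10 ^ (d.toNat / 2 + 1)) 0 1 [] (by omega) hc0
  simp only [Nat.cast_zero, zero_add, Nat.sub_zero, List.nil_append] at hA
  rw [hA]
  -- B's loop
  have hB := pvBLoop_run d hd (10 ^ (d.toNat / 2 + 1)) 0 PySem.Dict.empty (by omega)
  simp only [Nat.cast_zero, zero_add, Nat.sub_zero] at hB
  rw [hB]
  -- A's conversion, as folds over range (m+1)
  unfold pvConvertToDict
  rw [List.foldl_map, List.foldl_map]
  simp only [pvPass1Step_eq, pvPass2Step_eq, pvStep_eq]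
  -- drop the last element (its square has more than d digits)
  have hnotC : ¬ pvC d (pvM d.toNat) := by
    have := pvBreak d hd (pvM d.toNat) le_rfl
    unfold pvC
    omega
  rw [List.range_succ, List.foldl_append, List.foldl_append, List.foldl_cons, List.foldl_cons,
      List.foldl_nil, List.foldl_nil, if_neg hnotC, if_neg hnotC]
  -- both sides as folds over the filtered pair list
  rw [pvInsAbs, pvModAbs, pvModAbs, pvTwoPass]

-- ----- num_digits ≤ 0: both return {} -----

lemma pvSmallA (d : Int) (hd : d ≤ 0) : get_square_numbers d = [] := by
  unfold get_square_numbers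
  have h0 : d.toNat = 0 := by omega
  have hc : pvCondLt 1 d = false := by
    unfold pvCondLt
    split_ifs with h
    · rfl
    · rw [h0]; decide
  rw [h0]
  rw [show ((10 : Nat) ^ (0 / 2 + 1)) = 9 + 1 from by norm_num]
  rw [show pvALoop d (9 + 1) 1 1 [] = [] from by simp [pvALoop, hc]]
  rfl

lemma pvSmallB (d : Int) (hd : d ≤ 0) : get_square_numbers_alt d = [] := by
  unfold get_square_numbers_alt
  have h0 : d.toNat = 0 := by omega
  have hlen : PySem.Str.len (PySem.Int.toStr ((1 : Int) * 1)) = 1 := by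
    rw [show ((1 : Int) * 1) = (((1 : Nat) : Nat) : Int) from by norm_num, pvStrLen]
    decide
  have hbr : d < PySem.Str.len (PySem.Int.toStr ((1 : Int) * 1)) := by
    rw [hlen]; omega
  rw [h0]
  rw [show ((10 : Nat) ^ (0 / 2 + 1)) = 9 + 1 from by norm_num]
  rw [show pvBLoop d (9 + 1) 1 PySem.Dict.empty = PySem.Dict.empty from by
    simp only [pvBLoop]
    rw [if_pos hbr]]
  rfl

-- ===== VERDICT (by name: the statement is the Claim_ definition above) =====
theorem get_square_numbers_spec : Claim_equal_get_square_numbers := by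
  intro num_digits _
  unfold Spec_get_square_numbers
  by_cases hd : 1 ≤ num_digits
  · exact pvMain num_digits hd
  · rw [pvSmallA num_digits (by omega), pvSmallB num_digits (by omega)]
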